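-- pv_equiv track=rewrite | github.com/jayabhavana342/Checkers-RESTAPI | production/vagrant/app/app.py | checkWest
-- ===== SOURCE A (Python) =====
-- def checkWest(x, y, original, data, counter):
--     if counter == 0:
--         return True
--     if y == -1:
--         return False
--     else:
--         try:
--             return checkWest(x, y - 1, original, data, counter - 1) and data[x][y] == original
--         except IndexError:
--             return False
-- ===== SOURCE B (Python) =====
-- def checkWest(x, y, original, data, counter):
--     for c in range(y, y - counter, -1):
--         if c == -1:
--             # stepped off the west edge of the board
--             return False
--         try:
--             if data[x][c] != original:
--                 return False
--         except IndexError: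
--             return False
--     return True
-- ===== Notes on version B (the rewrite author's own statement) =====
-- stated objective: simpler
-- what changed: The recursion is replaced by a single westward for-loop over range(y, y-counter, -1) with early returns; Pre_ excludes negative counter, a count of cells outside the function's meaning for which neither value is specified (A returns False or raises RecursionError there, B checks zero cells and returns True) and the inputs whose recursion depth reaches CPython's recursion limit, where A raises RecursionError (the bound 900 sits just below the default limit of 1000, so a thin environment-dependent band of deep inputs on which A still returns is also excluded).
-- outside the precondition, e.g. on checkWest(0, 0, 1, [[1]], -1): A returns False, B returns True; on checkWest(0, 950, 1, [[1]], 950): A returns False, B returns False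
import Mathlib
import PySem

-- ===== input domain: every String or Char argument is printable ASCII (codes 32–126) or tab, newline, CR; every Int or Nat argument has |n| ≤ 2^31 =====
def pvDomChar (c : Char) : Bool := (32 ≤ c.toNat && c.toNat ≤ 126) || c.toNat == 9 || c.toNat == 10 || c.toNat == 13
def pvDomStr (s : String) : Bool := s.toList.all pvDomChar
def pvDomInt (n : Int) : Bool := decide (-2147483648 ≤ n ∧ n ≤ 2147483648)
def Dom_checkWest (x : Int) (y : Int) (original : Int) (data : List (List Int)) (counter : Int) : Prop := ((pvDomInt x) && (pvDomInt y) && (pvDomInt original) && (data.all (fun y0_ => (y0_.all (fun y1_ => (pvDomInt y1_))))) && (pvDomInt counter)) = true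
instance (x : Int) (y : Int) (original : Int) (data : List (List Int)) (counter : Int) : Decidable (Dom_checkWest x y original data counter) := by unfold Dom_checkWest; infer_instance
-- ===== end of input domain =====

-- B replaces A's recursion by one westward loop with early returns (simpler, O(1) stack); same value on counter ≥ 0.

-- ===== PORT A =====
-- A's recursion: each call either returns at a base case or recurses with counter-1, so on
-- counter ≥ 0 the depth is at most counter+1; fuel = counter.toNat + 1 makes the same recursion total.
def checkWestFuel (fuel : Nat) (x : Int) (y : Int) (original : Int) (data : List (List Int)) (counter : Int) : Bool :=
  match fuel with
  | 0 => false
  | fuel' + 1 =>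
    if counter = 0 then true
    else if y = -1 then false
    else
      -- try: return checkWest(...) and data[x][y] == original; except IndexError: return False
      if checkWestFuel fuel' x (y - 1) original data (counter - 1) then
        match PySem.List.pyGet? data x with
        | none => false
        | some row =>
          match PySem.List.pyGet? row y with
          | none => false
          | some v => v == original
      else false

def checkWest (x : Int) (y : Int) (original : Int) (data : List (List Int)) (counter : Int) : Bool :=
  checkWestFuel (counter.toNat + 1) x y original data counter

-- ===== PORT B =====
-- the loop body: if c == -1: return False; try: if data[x][c] != original: return False; except IndexError: return False
def goWest (x : Int) (original : Int) (data : List (List Int)) : List Int → Bool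
  | [] => true
  | c :: rest =>
    if c = -1 then false
    else
      match PySem.List.pyGet? data x with
      | none => false
      | some row =>
        match PySem.List.pyGet? row c with
        | none => false
        | some v => if v ≠ original then false else goWest x original data rest

def checkWest_alt (x : Int) (y : Int) (original : Int) (data : List (List Int)) (counter : Int) : Bool :=
  goWest x original data (PySem.List.pyRange y (y - counter) (-1))

-- ===== PRECONDITION & SPEC =====
-- Pre_ excludes (a) negative counter — a count of cells to inspect below zero, an input outside
-- the function's meaning: A returns False there (or raises RecursionError when y < -1 or y is
-- large) and B checks zero cells and returns True, and neither value is specified for it —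
-- and (b) inputs whose recursion depth in A (one frame per westward step, stopping at counter = 0
-- or, when -1 ≤ y, at column -1) reaches CPython's recursion limit, where A raises RecursionError:
-- the default limit is 1000 and the bound sits just below it because the handful of frames the
-- interpreter and the caller already occupy is environment-dependent (see the cite in claim.json).
def Pre_checkWest (x : Int) (y : Int) (original : Int) (data : List (List Int)) (counter : Int) : Prop :=
  0 ≤ counter ∧ (counter ≤ 900 ∨ (-1 ≤ y ∧ y ≤ 899))
instance (x : Int) (y : Int) (original : Int) (data : List (List Int)) (counter : Int) : Decidable (Pre_checkWest x y original data counter) := by unfold Pre_checkWest; infer_instance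

def pvWitness_checkWest : Int × Int × Int × List (List Int) × Int := (0, 1, 1, [[1, 1]], 2)

def Spec_checkWest (x : Int) (y : Int) (original : Int) (data : List (List Int)) (counter : Int) (out : Bool) : Prop := out = checkWest_alt x y original data counter
instance (x : Int) (y : Int) (original : Int) (data : List (List Int)) (counter : Int) (out : Bool) : Decidable (Spec_checkWest x y original data counter out) := by unfold Spec_checkWest; infer_instance

-- ===== CLAIM (what is proved, stated in full; the proofs are below) =====
def Claim_equal_checkWest : Prop := ∀ (x : Int) (y : Int) (original : Int) (data : List (List Int)) (counter : Int), Dom_checkWest x y original data counter → Pre_checkWest x y original data counter → Spec_checkWest x y original data counter (checkWest x y original data counter)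

-- ===== LEMMAS AND PROOFS =====

-- the per-cell check both programs perform at column c
def cellP (x : Int) (original : Int) (data : List (List Int)) (c : Int) : Bool :=
  if c = -1 then false
  else
    match PySem.List.pyGet? data x with
    | none => false
    | some row =>
      match PySem.List.pyGet? row c with
      | none => false
      | some v => v == original

lemma goWest_eq_all (x : Int) (original : Int) (data : List (List Int)) :
    ∀ l : List Int, goWest x original data l = l.all (cellP x original data) := by
  intro l
  induction l with
  | nil => rfl
  | cons c rest ih =>
    simp only [goWest, cellP, List.all_cons]
    split_ifs with h
    · simp
    · cases hg : PySem.List.pyGet? data x with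
      | none => simp
      | some row =>
        cases hr : PySem.List.pyGet? row c with
        | none => simp [hr]
        | some v =>
          by_cases hv : v = original
          · simp [hr, hv, ih]
          · simp [hr, hv]

lemma fuel_eq_all (x : Int) (original : Int) (data : List (List Int)) :
    ∀ (n : Nat) (fuel : Nat) (y : Int), n < fuel →
    checkWestFuel fuel x y original data (n : Int) =
      (PySem.List.pyRange (y - n + 1) (y + 1) 1).all (cellP x original data) := by
  intro n
  induction n with
  | zero =>
    intro fuel y hf
    cases fuel with
    | zero => omega
    | succ f =>
      simp [checkWestFuel]
  | succ n ih =>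
    intro fuel y hf
    cases fuel with
    | zero => omega
    | succ f =>
      have hcne : ((n : Int) + 1) ≠ 0 := by positivity
      have hsplit : PySem.List.pyRange (y - (↑n + 1) + 1) (y + 1) 1 =
          PySem.List.pyRange (y - (↑n + 1) + 1) y 1 ++ [y] := by
        simpa using PySem.List.pyRange_one_succ_right
          (a := y - (↑n + 1) + 1) (b := y) (by omega)
      by_cases hy : y = -1
      · subst hy
        simp only [checkWestFuel, Nat.cast_succ, if_neg hcne]
        rw [hsplit, List.all_append]
        simp [cellP]
      · have hrec := ih f (y - 1) (by omega)
        rw [show y - 1 - (n : Int) + 1 = y - (↑n + 1) + 1 by ring,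
            show y - 1 + 1 = y by ring] at hrec
        simp only [checkWestFuel, Nat.cast_succ, if_neg hcne, if_neg hy,
          show (n : Int) + 1 - 1 = (n : Int) by ring, hrec]
        rw [hsplit, List.all_append]
        cases hall : (PySem.List.pyRange (y - (↑n + 1) + 1) y 1).all (cellP x original data) with
        | false => simp
        | true =>
          simp only [Bool.true_and, List.all_cons, List.all_nil, Bool.and_true]
          unfold cellP
          rw [if_neg hy]
          cases PySem.List.pyGet? data x with
          | none => rfl
          | some row =>
            cases PySem.List.pyGet? row y with
            | none => rfl
            | some v => rfl

-- ===== VERDICT (by name: the statement is the Claim_ definition above) =====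
theorem checkWest_spec : Claim_equal_checkWest := by
  intro x y original data counter _ hPre
  unfold Pre_checkWest at hPre
  obtain ⟨hPre, -⟩ := hPre
  unfold Spec_checkWest checkWest checkWest_alt
  obtain ⟨n, rfl⟩ : ∃ n : Nat, counter = (n : Int) := ⟨counter.toNat, (Int.toNat_of_nonneg hPre).symm⟩
  rw [goWest_eq_all, fuel_eq_all x original data n ((n : Int).toNat + 1) y (by omega),
    PySem.List.pyRange_neg_one_eq_reverse, List.all_reverse,
    show y - (n : Int) + 1 = y - n + 1 by ring]
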